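-- pv_equiv track=rewrite | github.com/ooz34/codingtest-practice | 프로그래머스/2/131127. 할인 행사/할인 행사.py | solution
-- ===== SOURCE A (Python) =====
-- def solution(want, number, discount):
--     answer = 0
--     wants = dict(zip(want, number))
--
--     for i in range(len(discount)-9):
--         target = discount[i:i+10]
--
--         for name, cnt in wants.items():
--             if target.count(name) < cnt:
--                 break
--         else:
--             answer += 1
--
--     return answer
-- ===== SOURCE B (Python) =====
-- def solution(want, number, discount):
--     # Sliding window: incremental count dict + satisfied-key tracker instead of
--     # re-slicing and re-counting each length-10 window.
--     wants = dict(zip(want, number))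
--     n = len(discount)
--     if n < 10:
--         return 0
--     req = len(wants)
--     sat = sum(1 for v in wants.values() if v <= 0)
--     cnt = {}
--     for x in discount[:10]:
--         c = cnt.get(x, 0) + 1
--         cnt[x] = c
--         if wants.get(x) == c:
--             sat += 1
--     answer = 1 if sat == req else 0
--     for x, y in zip(discount[10:], discount):
--         c = cnt.get(x, 0) + 1
--         cnt[x] = c
--         if wants.get(x) == c:
--             sat += 1
--         c2 = cnt[y] - 1
--         cnt[y] = c2
--         if wants.get(y) == c2 + 1:
--             sat -= 1
--         if sat == req:
--             answer += 1
--     return answer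
-- ===== Notes on version B (the rewrite author's own statement) =====
-- stated objective: faster
-- what changed: A re-slices each of the ~N length-10 windows and recounts every wanted item inside it with target.count; B slides one window over discount, maintaining an incremental count dict and a satisfied-key counter so each step does O(1) dict work.
import Mathlib
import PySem

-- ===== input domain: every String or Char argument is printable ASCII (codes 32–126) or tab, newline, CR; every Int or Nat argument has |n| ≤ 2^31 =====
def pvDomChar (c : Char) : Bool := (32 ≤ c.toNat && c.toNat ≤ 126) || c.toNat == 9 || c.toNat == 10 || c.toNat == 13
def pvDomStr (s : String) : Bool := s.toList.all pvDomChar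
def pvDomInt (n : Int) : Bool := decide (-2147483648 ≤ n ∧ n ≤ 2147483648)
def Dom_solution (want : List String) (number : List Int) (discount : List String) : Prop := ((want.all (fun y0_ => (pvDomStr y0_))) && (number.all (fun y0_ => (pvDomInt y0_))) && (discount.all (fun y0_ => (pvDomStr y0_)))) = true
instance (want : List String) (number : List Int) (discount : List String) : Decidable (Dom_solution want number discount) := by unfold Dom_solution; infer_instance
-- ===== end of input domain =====

-- B replaces A's per-window re-slice-and-recount by one sliding window with an
-- incremental count dict and a satisfied-key tracker (same return value, fewer passes).

-- ===== PORT A =====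
-- A's inner 'for name, cnt in wants.items(): if target.count(name) < cnt: break' / 'else' loop
def checkWants (target : List String) : List (String × Int) → Bool
  | [] => true
  | (name, cnt) :: rest =>
      if (target.count name : Int) < cnt then false else checkWants target rest

def solution (want : List String) (number : List Int) (discount : List String) : Int :=
  let wants := PySem.Dict.ofList (want.zip number)
  (PySem.List.pyRange 0 ((discount.length : Int) - 9) 1).foldl
    (fun answer i =>
      let target := PySem.List.slice discount (some i) (some (i + 10))
      if checkWants target wants.items then answer + 1 else answer) 0

-- ===== PORT B =====
-- body of B's first loop: add item x to the window counts, bump sat on a threshold hit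
def addStep (wants : PySem.Dict String Int) (st : PySem.Dict String Int × Int)
    (x : String) : PySem.Dict String Int × Int :=
  let c := st.1.getD x 0 + 1
  let cnt := st.1.insert x c
  let sat := if wants.get? x = some c then st.2 + 1 else st.2
  (cnt, sat)

-- body of B's sliding loop over pairs (x, y) = (entering item, leaving item);
-- Python reads cnt[y] there: y is always in the current window, so the key is
-- present and 'getD y 0' is exact
def slideStep (wants : PySem.Dict String Int) (req : Int)
    (st : PySem.Dict String Int × Int × Int) (p : String × String) :
    PySem.Dict String Int × Int × Int :=
  let c := st.1.getD p.1 0 + 1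
  let cnt1 := st.1.insert p.1 c
  let sat1 := if wants.get? p.1 = some c then st.2.1 + 1 else st.2.1
  let c2 := cnt1.getD p.2 0 - 1
  let cnt2 := cnt1.insert p.2 c2
  let sat2 := if wants.get? p.2 = some (c2 + 1) then sat1 - 1 else sat1
  let ans := if sat2 = req then st.2.2 + 1 else st.2.2
  (cnt2, sat2, ans)

def solution_alt (want : List String) (number : List Int) (discount : List String) : Int :=
  let wants := PySem.Dict.ofList (want.zip number)
  let n : Int := discount.length
  if n < 10 then 0
  else
    let req : Int := wants.size
    let sat0 : Int := wants.values.foldl (fun acc v => if v ≤ 0 then acc + 1 else acc) 0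
    let st1 := (PySem.List.slice discount none (some 10)).foldl (addStep wants) (PySem.Dict.empty, sat0)
    let answer0 : Int := if st1.2 = req then 1 else 0
    let st2 := ((PySem.List.slice discount (some 10) none).zip discount).foldl
      (slideStep wants req) (st1.1, st1.2, answer0)
    st2.2.2

-- ===== PRECONDITION & SPEC =====
def Spec_solution (want : List String) (number : List Int) (discount : List String) (out : Int) : Prop := out = solution_alt want number discount
instance (want : List String) (number : List Int) (discount : List String) (out : Int) : Decidable (Spec_solution want number discount out) := by unfold Spec_solution; infer_instance

-- ===== CLAIM (what is proved, stated in full; the proofs are below) =====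
def Claim_equal_solution : Prop := ∀ (want : List String) (number : List Int) (discount : List String), Dom_solution want number discount → Spec_solution want number discount (solution want number discount)

-- ===== LEMMAS AND PROOFS =====

def wpred (w : List String) (p : String × Int) : Bool := decide (p.2 ≤ (w.count p.1 : Int))

lemma countP_bump (l : List (String × Int)) (hnd : (l.map Prod.fst).Nodup)
    (c : String → Int) (x : String) :
    l.countP (fun p => decide (p.2 ≤ (if p.1 = x then c p.1 + 1 else c p.1)))
      = l.countP (fun p => decide (p.2 ≤ c p.1))
        + (if (x, c x + 1) ∈ l then 1 else 0) := by
  induction l with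
  | nil => simp
  | cons p t ih =>
    obtain ⟨k, v⟩ := p
    have hk : ∀ q ∈ t, q.1 ≠ k := by
      intro q hq hqk
      simp only [List.map_cons, List.nodup_cons] at hnd
      exact hnd.1 (List.mem_map.mpr ⟨q, hq, hqk⟩)
    have ht : (t.map Prod.fst).Nodup := by
      simp only [List.map_cons, List.nodup_cons] at hnd; exact hnd.2
    simp only [List.countP_cons, List.mem_cons]
    by_cases hkx : k = x
    · subst hkx
      have htail : t.countP (fun p => decide (p.2 ≤ if p.1 = k then c p.1 + 1 else c p.1))
          = t.countP (fun p => decide (p.2 ≤ c p.1)) :=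
        List.countP_congr (fun q hq => by simp [hk q hq])
      have hmem : ¬ ((k, c k + 1) ∈ t) := fun hm => hk _ hm rfl
      by_cases hv : v = c k + 1
      · subst hv
        simp [htail, hmem]
      · have h1 : (decide (v ≤ c k + 1) : Bool) = decide (v ≤ c k) := by
          by_cases h2 : v ≤ c k
          · simp [h2]; omega
          · have h3 : ¬ v ≤ c k + 1 := by omega
            simp [h2, h3]
        have hpair : ¬ ((k, v) = (k, c k + 1)) := by simp [hv]
        simp [htail, hmem, h1]
        omega
    · have hpair : ¬ ((k, v) = (x, c x + 1)) := by
        simp [Prod.ext_iff]; intro h; exact absurd h hkx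
      simp only [hkx, if_false, ih ht]
      have hxk : ¬ (x = k ∧ c x + 1 = v) := fun h => hkx h.1.symm
      simp [hxk]
      omega

lemma checkWants_eq (target : List String) :
    ∀ items : List (String × Int), checkWants target items = items.all (wpred target) := by
  intro items
  induction items with
  | nil => rfl
  | cons p t ih =>
    obtain ⟨k, v⟩ := p
    simp only [checkWants, List.all_cons, wpred, ih]
    by_cases h : (target.count k : Int) < v
    · have h2 : ¬ v ≤ (target.count k : Int) := by omega
      simp [h, h2]
    · have h2 : v ≤ (target.count k : Int) := by omega
      simp [h, h2]

lemma satSpec_append (l : List (String × Int)) (hnd : (l.map Prod.fst).Nodup)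
    (w : List String) (x : String) :
    l.countP (wpred (w ++ [x]))
      = l.countP (wpred w) + (if (x, (w.count x : Int) + 1) ∈ l then 1 else 0) := by
  have h := countP_bump l hnd (fun k => (w.count k : Int)) x
  have hco : l.countP (wpred (w ++ [x]))
      = l.countP (fun p => decide (p.2 ≤ (if p.1 = x then (w.count p.1 : Int) + 1 else (w.count p.1 : Int)))) := by
    apply List.countP_congr; intro q hq
    have hcq : ((w ++ [x]).count q.1 : Int)
        = (if q.1 = x then (w.count q.1 : Int) + 1 else (w.count q.1 : Int)) := by
      by_cases hqx : q.1 = x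
      · simp [List.count_append, hqx]
      · simp [List.count_append, hqx, List.count_cons]
        exact fun h => hqx h.symm
    simp only [wpred, hcq]
  rw [hco, h]
  rfl

lemma satSpec_cons (l : List (String × Int)) (hnd : (l.map Prod.fst).Nodup)
    (y : String) (w : List String) :
    l.countP (wpred (y :: w))
      = l.countP (wpred w) + (if (y, (w.count y : Int) + 1) ∈ l then 1 else 0) := by
  have h := countP_bump l hnd (fun k => (w.count k : Int)) y
  have hco : l.countP (wpred (y :: w))
      = l.countP (fun p => decide (p.2 ≤ (if p.1 = y then (w.count p.1 : Int) + 1 else (w.count p.1 : Int)))) := by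
    apply List.countP_congr; intro q hq
    have hcq : ((y :: w).count q.1 : Int)
        = (if q.1 = y then (w.count q.1 : Int) + 1 else (w.count q.1 : Int)) := by
      by_cases hqy : q.1 = y
      · simp [List.count_cons, hqy]
      · simp [List.count_cons, hqy]
        exact fun h => hqy h.symm
    simp only [wpred, hcq]
  rw [hco, h]
  rfl

lemma keys_eq_map_fst (d : PySem.Dict String Int) : d.keys = d.items.map Prod.fst := rfl

lemma addStep_inv (wants : PySem.Dict String Int) (hnd : wants.keys.Nodup)
    (cnt : PySem.Dict String Int) (sat : Int) (u : List String) (x : String)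
    (hc : ∀ k, cnt.getD k 0 = (u.count k : Int))
    (hs : sat = (wants.items.countP (wpred u) : Int)) :
    (∀ k, (addStep wants (cnt, sat) x).1.getD k 0 = ((u ++ [x]).count k : Int)) ∧
      (addStep wants (cnt, sat) x).2 = (wants.items.countP (wpred (u ++ [x])) : Int) := by
  have hndi : (wants.items.map Prod.fst).Nodup := by rw [← keys_eq_map_fst]; exact hnd
  constructor
  · intro k
    simp only [addStep]
    by_cases hkx : k = x
    · subst hkx
      rw [PySem.Dict.getD_insert_self, hc k]
      simp [List.count_append]
    · rw [PySem.Dict.getD_insert_of_ne _ _ _ hkx, hc k]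
      simp [List.count_append, List.count_cons]
      exact fun h => hkx h.symm
  · simp only [addStep, hc x]
    rw [satSpec_append wants.items hndi u x]
    by_cases hget : wants.get? x = some ((u.count x : Int) + 1)
    · have hmem : (x, (u.count x : Int) + 1) ∈ wants.items :=
        PySem.Dict.mem_items_of_get?_eq_some _ hget
      simp [hget, hmem, hs]
    · have hmem : ¬ (x, (u.count x : Int) + 1) ∈ wants.items := by
        intro hm
        exact hget (PySem.Dict.get?_of_mem_items _ hm hnd)
      simp [hget, hmem, hs]

lemma addFold_inv (wants : PySem.Dict String Int) (hnd : wants.keys.Nodup) :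
    ∀ (xs : List String) (u : List String) (cnt : PySem.Dict String Int) (sat : Int),
      (∀ k, cnt.getD k 0 = (u.count k : Int)) →
      sat = (wants.items.countP (wpred u) : Int) →
      (∀ k, (xs.foldl (addStep wants) (cnt, sat)).1.getD k 0 = ((u ++ xs).count k : Int)) ∧
        (xs.foldl (addStep wants) (cnt, sat)).2 = (wants.items.countP (wpred (u ++ xs)) : Int) := by
  intro xs
  induction xs with
  | nil => intro u cnt sat hc hs; simpa using ⟨hc, hs⟩
  | cons x t ih =>
    intro u cnt sat hc hs
    have h1 := addStep_inv wants hnd cnt sat u x hc hs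
    have h2 := ih (u ++ [x]) (addStep wants (cnt, sat) x).1 (addStep wants (cnt, sat) x).2 h1.1 h1.2
    simpa [List.append_assoc] using h2

lemma slideStep_inv (wants : PySem.Dict String Int) (hnd : wants.keys.Nodup)
    (req : Int) (hreq : req = (wants.items.length : Int))
    (cnt : PySem.Dict String Int) (sat ans : Int) (y : String) (w' : List String) (x : String)
    (hc : ∀ k, cnt.getD k 0 = ((y :: w').count k : Int))
    (hs : sat = (wants.items.countP (wpred (y :: w')) : Int)) :
    (∀ k, (slideStep wants req (cnt, sat, ans) (x, y)).1.getD k 0 = ((w' ++ [x]).count k : Int)) ∧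
      (slideStep wants req (cnt, sat, ans) (x, y)).2.1 = (wants.items.countP (wpred (w' ++ [x])) : Int) ∧
      (slideStep wants req (cnt, sat, ans) (x, y)).2.2
        = ans + (if wants.items.all (wpred (w' ++ [x])) then 1 else 0) := by
  have hndi : (wants.items.map Prod.fst).Nodup := by rw [← keys_eq_map_fst]; exact hnd
  -- phase 1: adding x is exactly addStep on state (cnt, sat), window y :: w'
  have hadd := addStep_inv wants hnd cnt sat (y :: w') x hc hs
  set st1 := addStep wants (cnt, sat) x with hst1
  -- window after adding: y :: (w' ++ [x])
  have hwin : (y :: w') ++ [x] = y :: (w' ++ [x]) := by simp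
  rw [hwin] at hadd
  obtain ⟨hc1, hs1⟩ := hadd
  -- phase 2: removing y
  have hcy : st1.1.getD y 0 = ((y :: (w' ++ [x])).count y : Int) := hc1 y
  have hcount : ((y :: (w' ++ [x])).count y : Int) = ((w' ++ [x]).count y : Int) + 1 := by
    simp [List.count_cons]
  -- the resulting triple
  have hstep : slideStep wants req (cnt, sat, ans) (x, y)
      = (st1.1.insert y (st1.1.getD y 0 - 1),
         (if wants.get? y = some ((st1.1.getD y 0 - 1) + 1) then st1.2 - 1 else st1.2),
         (if (if wants.get? y = some ((st1.1.getD y 0 - 1) + 1) then st1.2 - 1 else st1.2) = req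
          then ans + 1 else ans)) := by
    simp only [slideStep, addStep, hst1]
  have hsat2 : (if wants.get? y = some ((st1.1.getD y 0 - 1) + 1) then st1.2 - 1 else st1.2)
      = (wants.items.countP (wpred (w' ++ [x])) : Int) := by
    have hcons := satSpec_cons wants.items hndi y (w' ++ [x])
    rw [hcy, hcount]
    have harg : ((w' ++ [x]).count y : Int) + 1 - 1 + 1 = ((w' ++ [x]).count y : Int) + 1 := by ring
    rw [harg]
    by_cases hget : wants.get? y = some (((w' ++ [x]).count y : Int) + 1)
    · have hmem : (y, ((w' ++ [x]).count y : Int) + 1) ∈ wants.items :=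
        PySem.Dict.mem_items_of_get?_eq_some _ hget
      rw [if_pos hget, hs1, hcons, if_pos hmem]
      push_cast; ring
    · have hmem : ¬ (y, ((w' ++ [x]).count y : Int) + 1) ∈ wants.items := by
        intro hm; exact hget (PySem.Dict.get?_of_mem_items _ hm hnd)
      rw [if_neg hget, hs1, hcons, if_neg hmem]
      push_cast; ring
  refine ⟨?_, ?_, ?_⟩
  · intro k
    rw [hstep]
    by_cases hky : k = y
    · subst hky
      rw [PySem.Dict.getD_insert_self, hcy, hcount]; ring
    · rw [PySem.Dict.getD_insert_of_ne _ _ _ hky, hc1 k]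
      simp [List.count_cons]
      intro h; exact absurd h.symm hky
  · rw [hstep]; exact hsat2
  · rw [hstep]
    simp only [hsat2, hreq]
    by_cases hall : wants.items.all (wpred (w' ++ [x]))
    · have : wants.items.countP (wpred (w' ++ [x])) = wants.items.length :=
        List.countP_eq_length.mpr (by simpa [List.all_eq_true] using hall)
      simp [hall, this]
    · have hlt : wants.items.countP (wpred (w' ++ [x])) ≠ wants.items.length := by
        intro h
        exact hall (List.all_eq_true.mpr (fun a ha => List.countP_eq_length.mp h a ha))
      have : ((wants.items.countP (wpred (w' ++ [x])) : Int)) ≠ (wants.items.length : Int) := by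
        exact_mod_cast hlt
      simp [hall, this]

def winAt (d : List String) (j : Nat) : List String := (d.drop j).take 10

lemma winAt_cons (d : List String) (j : Nat) (h : j < d.length) :
    winAt d j = d[j] :: (d.drop (j+1)).take 9 := by
  unfold winAt
  rw [List.drop_eq_getElem_cons h]
  rw [show (10:Nat) = 9+1 from rfl, List.take_succ_cons]

lemma winAt_snoc (d : List String) (j : Nat) (h : j + 10 < d.length) :
    (d.drop (j+1)).take 9 ++ [d[j+10]] = winAt d (j+1) := by
  unfold winAt
  have h9 : 9 < (d.drop (j+1)).length := by
    rw [List.length_drop]; omega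
  have hget : (List.drop (j+1) d)[9]? = some d[j+10] := by
    rw [List.getElem?_drop]
    have he : j + 1 + 9 = j + 10 := by omega
    conv_lhs => rw [he]
    exact List.getElem?_eq_getElem h
  conv_rhs => rw [show (10:Nat) = 9+1 from rfl, List.take_succ, hget]
  rfl

lemma countP_eq_length_iff_all (l : List (String × Int)) (w : List String) :
    ((l.countP (wpred w) : Int) = (l.length : Int)) ↔ l.all (wpred w) = true := by
  rw [Int.natCast_inj]
  constructor
  · intro h; exact List.all_eq_true.mpr (fun a ha => List.countP_eq_length.mp h a ha)
  · intro h; exact List.countP_eq_length.mpr (fun a ha => List.all_eq_true.mp h a ha)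

lemma zipFold_go (wants : PySem.Dict String Int) (hnd : wants.keys.Nodup)
    (req : Int) (hreq : req = (wants.items.length : Int)) (d : List String) :
    ∀ (m j : Nat) (cnt : PySem.Dict String Int) (sat ans : Int),
      m + j + 10 = d.length →
      (∀ k, cnt.getD k 0 = ((winAt d j).count k : Int)) →
      sat = (wants.items.countP (wpred (winAt d j)) : Int) →
      ans = (((List.range (j+1)).countP (fun i => wants.items.all (wpred (winAt d i)))) : Int) →
      (((d.drop (j+10)).zip (d.drop j)).foldl (slideStep wants req) (cnt, sat, ans)).2.2
        = (((List.range (d.length - 9)).countP (fun i => wants.items.all (wpred (winAt d i)))) : Int) := by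
  intro m
  induction m with
  | zero =>
    intro j cnt sat ans hm hc hs ha
    have hdrop : d.drop (j+10) = [] := List.drop_eq_nil_of_le (by omega)
    rw [hdrop, List.zip_nil_left, List.foldl_nil]
    have : d.length - 9 = j + 1 := by omega
    rw [this]
    exact ha
  | succ m ih =>
    intro j cnt sat ans hm hc hs ha
    have hj10 : j + 10 < d.length := by omega
    have hj : j < d.length := by omega
    have hd1 : d.drop (j+10) = d[j+10] :: d.drop (j+10+1) := List.drop_eq_getElem_cons hj10
    have hd2 : d.drop j = d[j] :: d.drop (j+1) := List.drop_eq_getElem_cons hj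
    rw [hd1, hd2, List.zip_cons_cons, List.foldl_cons]
    have hwc : ∀ k, cnt.getD k 0 = ((d[j] :: (d.drop (j+1)).take 9).count k : Int) := by
      intro k; rw [hc k, winAt_cons d j hj]
    have hws : sat = (wants.items.countP (wpred (d[j] :: (d.drop (j+1)).take 9)) : Int) := by
      rw [hs, winAt_cons d j hj]
    have hstep := slideStep_inv wants hnd req hreq cnt sat ans d[j] ((d.drop (j+1)).take 9) d[j+10] hwc hws
    obtain ⟨hC, hS, hA⟩ := hstep
    rw [winAt_snoc d j hj10] at hC hS hA
    -- rewrite the state triple as its components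
    have hsplit : slideStep wants req (cnt, sat, ans) (d[j+10], d[j])
        = ((slideStep wants req (cnt, sat, ans) (d[j+10], d[j])).1,
           (slideStep wants req (cnt, sat, ans) (d[j+10], d[j])).2.1,
           (slideStep wants req (cnt, sat, ans) (d[j+10], d[j])).2.2) := rfl
    rw [hsplit]
    have hidx : j+10+1 = (j+1)+10 := by omega
    rw [hidx]
    apply ih (j+1) _ _ _ (by omega) hC hS
    rw [hA, ha]
    conv_rhs => rw [List.range_succ]
    rw [List.countP_append]
    push_cast
    simp [List.countP_cons]

lemma solutionA_eq (want : List String) (number : List Int) (discount : List String) :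
    solution want number discount
      = (((List.range (discount.length - 9)).countP
          (fun j => (PySem.Dict.ofList (want.zip number)).items.all (wpred (winAt discount j)))) : Int) := by
  simp only [solution, PySem.List.pyRange_one, List.foldl_map, PySem.List.foldl_if_add_one,
    zero_add, sub_zero]
  have htn : (((discount.length : Int) - 9).toNat) = discount.length - 9 := by omega
  rw [htn]
  congr 1
  apply List.countP_congr
  intro k hk
  have hsl : PySem.List.slice discount (some (k : Int)) (some ((k : Int) + 10)) = winAt discount k := by
    simpa using PySem.List.slice_natCast_add discount k 10
  rw [checkWants_eq, hsl]

lemma size_eq (want : List String) (number : List Int) :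
    ((PySem.Dict.ofList (want.zip number)).size : Int)
      = ((PySem.Dict.ofList (want.zip number)).items.length : Int) := rfl

lemma solutionB_eq (want : List String) (number : List Int) (discount : List String) :
    solution_alt want number discount
      = (((List.range (discount.length - 9)).countP
          (fun j => (PySem.Dict.ofList (want.zip number)).items.all (wpred (winAt discount j)))) : Int) := by
  by_cases hlen : (discount.length : Int) < 10
  · simp only [solution_alt, if_pos hlen]
    have h0 : discount.length - 9 = 0 := by omega
    rw [h0]
    simp
  · simp only [solution_alt, if_neg hlen]
    have hnd : (PySem.Dict.ofList (want.zip number)).keys.Nodup := PySem.Dict.nodup_keys_ofList _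
    have h10 : 10 ≤ discount.length := by omega
    have hs1 : PySem.List.slice discount none (some 10) = discount.take 10 := by
      simpa using PySem.List.slice_to_natCast discount 10
    have hs2 : PySem.List.slice discount (some 10) none = discount.drop 10 := by
      simpa using PySem.List.slice_from_natCast discount 10
    rw [hs1, hs2]
    have hsat0 : (PySem.Dict.ofList (want.zip number)).values.foldl
        (fun acc v => if v ≤ 0 then acc + 1 else acc) 0
        = ((PySem.Dict.ofList (want.zip number)).items.countP (wpred []) : Int) := by
      rw [PySem.List.foldl_ite_add_one]
      rw [zero_add]
      congr 1
      show ((PySem.Dict.ofList (want.zip number)).items.map Prod.snd).countP _ = _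
      rw [List.countP_map]
      apply List.countP_congr
      intro q hq
      simp [wpred]
    rw [hsat0]
    obtain ⟨hC0, hS0⟩ := addFold_inv (PySem.Dict.ofList (want.zip number)) hnd
      (discount.take 10) [] PySem.Dict.empty
      (((PySem.Dict.ofList (want.zip number)).items.countP (wpred []) : Int))
      (fun k => by simp [PySem.Dict.getD_empty]) rfl
    have hwin0 : ([] ++ discount.take 10 : List String) = winAt discount 0 := by
      simp [winAt]
    rw [hwin0] at hC0 hS0
    have hans0 : (if ((discount.take 10).foldl (addStep (PySem.Dict.ofList (want.zip number)))
          (PySem.Dict.empty, ((PySem.Dict.ofList (want.zip number)).items.countP (wpred []) : Int))).2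
            = ((PySem.Dict.ofList (want.zip number)).size : Int) then (1:Int) else 0)
        = (((List.range (0+1)).countP
            (fun i => (PySem.Dict.ofList (want.zip number)).items.all (wpred (winAt discount i)))) : Int) := by
      rw [hS0, size_eq, List.range_one]
      by_cases hall : (PySem.Dict.ofList (want.zip number)).items.all (wpred (winAt discount 0)) = true
      · rw [if_pos ((countP_eq_length_iff_all _ _).mpr hall)]
        simp [hall]
      · rw [if_neg (fun h => hall ((countP_eq_length_iff_all _ _).mp h))]
        have hfalse : (PySem.Dict.ofList (want.zip number)).items.all (wpred (winAt discount 0)) = false :=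
          eq_false_of_ne_true hall
        simp [List.countP_cons, hfalse]
    rw [hans0]
    have hgo := zipFold_go (PySem.Dict.ofList (want.zip number)) hnd
      ((PySem.Dict.ofList (want.zip number)).size : Int) (size_eq want number) discount
      (discount.length - 10) 0
      ((discount.take 10).foldl (addStep (PySem.Dict.ofList (want.zip number)))
        (PySem.Dict.empty, ((PySem.Dict.ofList (want.zip number)).items.countP (wpred []) : Int))).1
      ((discount.take 10).foldl (addStep (PySem.Dict.ofList (want.zip number)))
        (PySem.Dict.empty, ((PySem.Dict.ofList (want.zip number)).items.countP (wpred []) : Int))).2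
      (((List.range (0+1)).countP
            (fun i => (PySem.Dict.ofList (want.zip number)).items.all (wpred (winAt discount i)))) : Int)
      (by omega) hC0 hS0 rfl
    simpa using hgo

-- ===== VERDICT (by name: the statement is the Claim_ definition above) =====
theorem solution_spec : Claim_equal_solution := by
  intro want number discount _
  unfold Spec_solution
  rw [solutionA_eq, solutionB_eq]
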